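-- pv_equiv track=rewrite | github.com/iamabhi6345/DSA | maths/2.py | max_networks
-- ===== SOURCE A (Python) =====
-- def max_networks(n, speed, minComps, speedThreshold):
--     count = 0
--     i = 0
--
--     while i < n:
--         total_speed = 0
--         num_computers = 0
--
--         # Form a network starting from computer i
--         while i < n and num_computers < minComps:
--             total_speed += speed[i]
--             num_computers += 1
--             i += 1
--
--         # Check if the network meets the speed threshold
--         while i < n and total_speed < speedThreshold:
--             total_speed += speed[i]
--             num_computers += 1
--             i += 1
--
--         # If we have at least minComps and total_speed >= speedThreshold, count this network
--         if num_computers >= minComps and total_speed >= speedThreshold: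
--             count += 1
--
--     return count
-- ===== SOURCE B (Python) =====
-- def max_networks(n, speed, minComps, speedThreshold):
--     m = max(n, 0)
--     # pass 1: prefix sums (prefix[k] = sum of first k speeds)
--     prefix = [0]
--     for i in range(m):
--         prefix.append(prefix[i] + speed[i])
--     # pass 2: greedy cut points expressed via prefix-sum differences;
--     # j is the last cut position, no running total or element count is kept
--     count = 0
--     j = 0
--     for k in range(1, m + 1):
--         if k - j >= minComps and prefix[k] - prefix[j] >= speedThreshold:
--             count += 1
--             j = k
--     return count
-- ===== Notes on version B (the rewrite author's own statement) =====
-- stated objective: alternative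
-- what changed: Replaced A's three nested while-loops with running total/element-count state by two staged passes: first build a prefix-sum array, then scan once keeping only the last cut index j, counting a cut when k-j>=minComps and prefix[k]-prefix[j]>=speedThreshold.
import Mathlib
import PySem

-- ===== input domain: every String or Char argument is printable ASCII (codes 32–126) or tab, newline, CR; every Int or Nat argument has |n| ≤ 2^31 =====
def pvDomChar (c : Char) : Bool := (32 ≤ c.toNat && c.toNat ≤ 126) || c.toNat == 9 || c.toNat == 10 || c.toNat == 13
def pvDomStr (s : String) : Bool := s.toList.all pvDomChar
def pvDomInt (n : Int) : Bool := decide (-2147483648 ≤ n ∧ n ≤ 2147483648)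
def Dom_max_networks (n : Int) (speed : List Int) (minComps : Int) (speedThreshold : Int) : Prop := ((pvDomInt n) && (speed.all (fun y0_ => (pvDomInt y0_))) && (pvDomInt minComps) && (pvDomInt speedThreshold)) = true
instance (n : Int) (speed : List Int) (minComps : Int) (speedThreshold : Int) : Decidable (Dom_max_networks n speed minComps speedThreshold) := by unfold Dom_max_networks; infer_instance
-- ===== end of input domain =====

-- B replaces A's nested while-loops (running total / element count, restarted per group) by two
-- staged passes: build a prefix-sum array, then scan cut points keeping only the last cut index.

-- ===== PORT A =====
-- inner while loop 1: 'while i < n and num_computers < minComps: total += speed[i]; num += 1; i += 1'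
-- fuel-recursion; each iteration advances i, so fuel = n.toNat suffices (exact wherever the Python loop terminates)
def aLoop1 (speed : List Int) (n minComps : Int) : Nat → Int → Int → Int → Int × Int × Int
  | 0, i, total, num => (i, total, num)
  | fuel+1, i, total, num =>
    if i < n ∧ num < minComps then
      aLoop1 speed n minComps fuel (i+1) (total + (PySem.List.pyGet? speed i).getD 0) (num+1)
    else (i, total, num)

-- inner while loop 2: 'while i < n and total_speed < speedThreshold: …'
def aLoop2 (speed : List Int) (n speedThreshold : Int) : Nat → Int → Int → Int → Int × Int × Int
  | 0, i, total, num => (i, total, num)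
  | fuel+1, i, total, num =>
    if i < n ∧ total < speedThreshold then
      aLoop2 speed n speedThreshold fuel (i+1) (total + (PySem.List.pyGet? speed i).getD 0) (num+1)
    else (i, total, num)

-- outer while loop: 'while i < n: …'; under Pre_ each outer iteration advances i, so fuel n.toNat suffices
def aOuter (speed : List Int) (n minComps speedThreshold : Int) : Nat → Int → Int → Int
  | 0, _, count => count
  | fuel+1, i, count =>
    if i < n then
      let r1 := aLoop1 speed n minComps n.toNat i 0 0
      let r2 := aLoop2 speed n speedThreshold n.toNat r1.1 r1.2.1 r1.2.2
      aOuter speed n minComps speedThreshold fuel r2.1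
        (if minComps ≤ r2.2.2 ∧ speedThreshold ≤ r2.2.1 then count + 1 else count)
    else count

def max_networks (n : Int) (speed : List Int) (minComps : Int) (speedThreshold : Int) : Int :=
  aOuter speed n minComps speedThreshold n.toNat 0 0

-- ===== PORT B =====
-- pass 1: 'prefix = [0]; for i in range(m): prefix.append(prefix[i] + speed[i])'
def bPrefix (speed : List Int) (m : Nat) : List Int :=
  (List.range m).foldl
    (fun p i => p ++ [p.getD i 0 + (PySem.List.pyGet? speed (i : Int)).getD 0]) [0]

-- pass 2 body: 'if k - j >= minComps and prefix[k] - prefix[j] >= speedThreshold: count += 1; j = k'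
def bStep (pre : List Int) (minComps thr : Int) (acc : Int × Int) (k : Int) : Int × Int :=
  if minComps ≤ k - acc.2 ∧ thr ≤ pre.getD k.toNat 0 - pre.getD acc.2.toNat 0
  then (acc.1 + 1, k) else acc

def max_networks_alt (n : Int) (speed : List Int) (minComps : Int) (speedThreshold : Int) : Int :=
  let m : Int := max n 0
  let pre := bPrefix speed m.toNat
  ((PySem.List.pyRange 1 (m + 1) 1).foldl (bStep pre minComps speedThreshold) (0, 0)).1

-- ===== PRECONDITION & SPEC =====
-- Pre_ excludes exactly the inputs where the Python A does not return: n > len(speed) makes A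
-- (and B) raise IndexError, and n > 0 with minComps ≤ 0 and speedThreshold ≤ 0 makes A's outer
-- loop spin forever (i never advances).
def Pre_max_networks (n : Int) (speed : List Int) (minComps : Int) (speedThreshold : Int) : Prop :=
  n ≤ (speed.length : Int) ∧ (n ≤ 0 ∨ 0 < minComps ∨ 0 < speedThreshold)
instance (n : Int) (speed : List Int) (minComps : Int) (speedThreshold : Int) : Decidable (Pre_max_networks n speed minComps speedThreshold) := by unfold Pre_max_networks; infer_instance

def pvWitness_max_networks : Int × List Int × Int × Int := (4, [3, 1, 2, 6], 2, 4)

def Spec_max_networks (n : Int) (speed : List Int) (minComps : Int) (speedThreshold : Int) (out : Int) : Prop := out = max_networks_alt n speed minComps speedThreshold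
instance (n : Int) (speed : List Int) (minComps : Int) (speedThreshold : Int) (out : Int) : Decidable (Spec_max_networks n speed minComps speedThreshold out) := by unfold Spec_max_networks; infer_instance

-- ===== CLAIM (what is proved, stated in full; the proofs are below) =====
def Claim_equal_max_networks : Prop := ∀ (n : Int) (speed : List Int) (minComps : Int) (speedThreshold : Int), Dom_max_networks n speed minComps speedThreshold → Pre_max_networks n speed minComps speedThreshold → Spec_max_networks n speed minComps speedThreshold (max_networks n speed minComps speedThreshold)

-- ===== LEMMAS AND PROOFS =====

-- reference single pass over the list of the first n speeds: cut when num ≥ minComps and total ≥ thr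
def runB (mC thr : Int) : List Int → Int → Int → Int
  | [], _, _ => 0
  | s :: rest, t, m =>
    if mC ≤ m + 1 ∧ thr ≤ t + s then 1 + runB mC thr rest 0 0 else runB mC thr rest (t + s) (m + 1)

-- the part of speed that remains to be scanned from index i (within the first n)
def seg (speed : List Int) (n i : Int) : List Int := (speed.take n.toNat).drop i.toNat

lemma seg_nil (speed : List Int) (n i : Int) (h : n ≤ i) : seg speed n i = [] := by
  apply List.drop_eq_nil_of_le
  have := List.length_take_le n.toNat speed
  omega

lemma seg_cons (speed : List Int) (n i : Int) (h0 : 0 ≤ i) (h1 : i < n)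
    (h2 : n ≤ (speed.length : Int)) :
    seg speed n i = (PySem.List.pyGet? speed i).getD 0 :: seg speed n (i+1) := by
  have hlt : i.toNat < (speed.take n.toNat).length := by
    simp only [List.length_take]; omega
  have hlt' : i.toNat < speed.length := by omega
  rw [seg, List.drop_eq_getElem_cons hlt, List.getElem_take]
  congr 1
  · rw [PySem.List.pyGet?_of_nonneg speed h0, List.getElem?_eq_getElem hlt']
    rfl
  · rw [seg]
    congr 1
    omega

lemma runB_nil (mC thr t m : Int) : runB mC thr [] t m = 0 := rfl

-- if total already meets the threshold (or i is past n), loop 2 is a no-op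
lemma aLoop2_noop (speed : List Int) (n thr : Int) (fuel : Nat) (i t m : Int)
    (h : thr ≤ t ∨ n ≤ i) : aLoop2 speed n thr fuel i t m = (i, t, m) := by
  cases fuel with
  | zero => rfl
  | succ f =>
    simp only [aLoop2]
    rw [if_neg]
    intro ⟨h1, h2⟩
    rcases h with h | h <;> omega

-- loop 1: consumes elements while num < minComps; relates A's state to the single pass
lemma S1 (speed : List Int) (n mC thr : Int) (hlen : n ≤ (speed.length : Int)) :
    ∀ (fuel : Nat) (i t m i' t' m' : Int), 0 ≤ i → i ≤ n → (n - i).toNat ≤ fuel →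
    ¬ (mC ≤ m ∧ thr ≤ t) →
    aLoop1 speed n mC fuel i t m = (i', t', m') →
    i ≤ i' ∧ i' ≤ n ∧ (i' = n ∨ mC ≤ m') ∧ (i' = i → t' = t ∧ m' = m) ∧
    runB mC thr (seg speed n i) t m =
      (if mC ≤ m' ∧ thr ≤ t' then 1 + runB mC thr (seg speed n i') 0 0
       else runB mC thr (seg speed n i') t' m') := by
  intro fuel
  induction fuel with
  | zero =>
    intro i t m i' t' m' h0 h1 hf hneg heq
    have hin : i = n := by omega
    simp only [aLoop1, Prod.mk.injEq] at heq
    obtain ⟨rfl, rfl, rfl⟩ := heq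
    refine ⟨le_refl _, h1, Or.inl hin, fun _ => ⟨rfl, rfl⟩, ?_⟩
    rw [if_neg hneg]
  | succ fuel ih =>
    intro i t m i' t' m' h0 h1 hf hneg heq
    simp only [aLoop1] at heq
    split_ifs at heq with hc
    · obtain ⟨hin, hmn⟩ := hc
      by_cases hcut : mC ≤ m + 1 ∧ thr ≤ t + (PySem.List.pyGet? speed i).getD 0
      · -- after this element the cut condition holds; the next call exits at once (num ≥ minComps)
        have hexit : aLoop1 speed n mC fuel (i+1) (t + (PySem.List.pyGet? speed i).getD 0) (m+1)
            = (i+1, t + (PySem.List.pyGet? speed i).getD 0, m+1) := by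
          cases fuel with
          | zero => rfl
          | succ f => simp only [aLoop1]; rw [if_neg]; intro ⟨_, h⟩; omega
        rw [hexit] at heq
        simp only [Prod.mk.injEq] at heq
        obtain ⟨rfl, rfl, rfl⟩ := heq
        refine ⟨by omega, by omega, Or.inr hcut.1, by intro h; omega, ?_⟩
        rw [seg_cons speed n i h0 hin hlen]
        simp only [runB]
      · obtain ⟨p1, p2, p3, p4, p5⟩ :=
          ih (i+1) (t + (PySem.List.pyGet? speed i).getD 0) (m+1) i' t' m'
            (by omega) (by omega) (by omega) hcut heq
        refine ⟨by omega, p2, p3, by intro h; omega, ?_⟩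
        rw [seg_cons speed n i h0 hin hlen]
        simp only [runB]
        rw [if_neg hcut]
        exact p5
    · simp only [Prod.mk.injEq] at heq
      obtain ⟨rfl, rfl, rfl⟩ := heq
      push_neg at hc
      refine ⟨le_refl _, h1, ?_, fun _ => ⟨rfl, rfl⟩, ?_⟩
      · by_cases h : i < n
        · exact Or.inr (by have := hc h; omega)
        · exact Or.inl (by omega)
      · rw [if_neg hneg]

-- loop 2: consumes elements while total < threshold, given num already ≥ minComps
lemma S2 (speed : List Int) (n mC thr : Int) (hlen : n ≤ (speed.length : Int)) :
    ∀ (fuel : Nat) (i t m i' t' m' : Int), 0 ≤ i → i ≤ n → (n - i).toNat ≤ fuel →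
    mC ≤ m → t < thr →
    aLoop2 speed n thr fuel i t m = (i', t', m') →
    i ≤ i' ∧ i' ≤ n ∧ m ≤ m' ∧ (i' = n ∨ thr ≤ t') ∧ (i' = i → t' = t) ∧
    runB mC thr (seg speed n i) t m =
      (if thr ≤ t' then 1 + runB mC thr (seg speed n i') 0 0 else 0) := by
  intro fuel
  induction fuel with
  | zero =>
    intro i t m i' t' m' h0 h1 hf hm ht heq
    have hin : i = n := by omega
    simp only [aLoop2, Prod.mk.injEq] at heq
    obtain ⟨rfl, rfl, rfl⟩ := heq
    refine ⟨le_refl _, h1, le_refl _, Or.inl hin, fun _ => rfl, ?_⟩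
    rw [if_neg (by omega), seg_nil speed n i (by omega), runB_nil]
  | succ fuel ih =>
    intro i t m i' t' m' h0 h1 hf hm ht heq
    simp only [aLoop2] at heq
    split_ifs at heq with hc
    · obtain ⟨hin, _⟩ := hc
      by_cases hcut : thr ≤ t + (PySem.List.pyGet? speed i).getD 0
      · have hexit : aLoop2 speed n thr fuel (i+1) (t + (PySem.List.pyGet? speed i).getD 0) (m+1)
            = (i+1, t + (PySem.List.pyGet? speed i).getD 0, m+1) :=
          aLoop2_noop speed n thr fuel _ _ _ (Or.inl hcut)
        rw [hexit] at heq
        simp only [Prod.mk.injEq] at heq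
        obtain ⟨rfl, rfl, rfl⟩ := heq
        refine ⟨by omega, by omega, by omega, Or.inr hcut, by intro h; omega, ?_⟩
        rw [seg_cons speed n i h0 hin hlen]
        simp only [runB]
        rw [if_pos ⟨by omega, hcut⟩, if_pos hcut]
      · obtain ⟨p1, p2, p3, p4, p5, p6⟩ :=
          ih (i+1) (t + (PySem.List.pyGet? speed i).getD 0) (m+1) i' t' m'
            (by omega) (by omega) (by omega) (by omega) (by omega) heq
        refine ⟨by omega, p2, by omega, p4, by intro h; omega, ?_⟩
        rw [seg_cons speed n i h0 hin hlen]
        simp only [runB]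
        rw [if_neg (by intro ⟨_, h⟩; exact hcut h)]
        exact p6
    · simp only [Prod.mk.injEq] at heq
      obtain ⟨rfl, rfl, rfl⟩ := heq
      push_neg at hc
      refine ⟨le_refl _, h1, le_refl _, ?_, fun _ => rfl, ?_⟩
      · by_cases h : i < n
        · exact absurd (hc h) (by omega)
        · exact Or.inl (by omega)
      · have hin : i = n := by
          by_cases h : i < n
          · exact absurd (hc h) (by omega)
          · omega
        rw [if_neg (by omega), seg_nil speed n i (by omega), runB_nil]

-- one outer iteration (group) from index i: advances i and accounts for one possible count
lemma group (speed : List Int) (n mC thr i : Int) (hlen : n ≤ (speed.length : Int))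
    (h0 : 0 ≤ i) (hin : i < n) (hpre : ¬ (mC ≤ 0 ∧ thr ≤ 0)) :
    ∀ (i1 t1 m1 i2 t2 m2 : Int),
    aLoop1 speed n mC n.toNat i 0 0 = (i1, t1, m1) →
    aLoop2 speed n thr n.toNat i1 t1 m1 = (i2, t2, m2) →
    i < i2 ∧ i2 ≤ n ∧
    runB mC thr (seg speed n i) 0 0 =
      (if mC ≤ m2 ∧ thr ≤ t2 then 1 else 0) + runB mC thr (seg speed n i2) 0 0 := by
  intro i1 t1 m1 i2 t2 m2 h1eq h2eq
  obtain ⟨q1, q2, q3, q4, q5⟩ :=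
    S1 speed n mC thr hlen n.toNat i 0 0 i1 t1 m1 h0 (by omega) (by omega) hpre h1eq
  by_cases hA : mC ≤ m1 ∧ thr ≤ t1
  · -- loop 2 exits immediately, this group is counted
    rw [aLoop2_noop speed n thr n.toNat i1 t1 m1 (Or.inl hA.2)] at h2eq
    simp only [Prod.mk.injEq] at h2eq
    obtain ⟨rfl, rfl, rfl⟩ := h2eq
    have hprog : i < i1 := by
      rcases lt_or_eq_of_le q1 with h | h
      · exact h
      · obtain ⟨e1, e2⟩ := q4 h.symm
        exact absurd ⟨by omega, by omega⟩ hpre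
    refine ⟨hprog, q2, ?_⟩
    rw [q5, if_pos hA, if_pos hA]
  · rw [q5, if_neg hA]
    rcases q3 with hq | hq
    · -- loop 1 ran out of elements: loop 2 is a no-op, nothing is counted
      rw [aLoop2_noop speed n thr n.toNat i1 t1 m1 (Or.inr (by omega))] at h2eq
      simp only [Prod.mk.injEq] at h2eq
      obtain ⟨rfl, rfl, rfl⟩ := h2eq
      refine ⟨by omega, by omega, ?_⟩
      rw [seg_nil speed n i1 (by omega), if_neg hA]
      simp [runB]
    · -- num ≥ minComps and total < thr: loop 2 runs
      have ht : t1 < thr := by by_contra h; exact hA ⟨hq, by omega⟩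
      obtain ⟨w1, w2, w3, w4, w5, w6⟩ :=
        S2 speed n mC thr hlen n.toNat i1 t1 m1 i2 t2 m2 (by omega) q2 (by omega) hq ht h2eq
      have hprog : i < i2 := by
        rcases lt_or_eq_of_le w1 with h | h
        · omega
        · have e1 := w5 h.symm
          rcases w4 with h4 | h4
          · omega
          · omega
      refine ⟨hprog, w2, ?_⟩
      rw [w6]
      by_cases hthr : thr ≤ t2
      · rw [if_pos hthr, if_pos ⟨by omega, hthr⟩]
      · rw [if_neg hthr, if_neg (by intro ⟨_, h⟩; exact hthr h)]
        have hn2 : i2 = n := by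
          rcases w4 with h | h
          · exact h
          · omega
        rw [hn2, seg_nil speed n n (le_refl _), runB_nil]
        ring

-- outer loop = count of the single pass over the remaining segment
lemma L_out (speed : List Int) (n mC thr : Int) (hlen : n ≤ (speed.length : Int))
    (hpre : ¬ (mC ≤ 0 ∧ thr ≤ 0)) :
    ∀ (fuel : Nat) (i count : Int), 0 ≤ i → i ≤ n → (n - i).toNat ≤ fuel →
    aOuter speed n mC thr fuel i count = count + runB mC thr (seg speed n i) 0 0 := by
  intro fuel
  induction fuel with
  | zero =>
    intro i count h0 h1 hf
    simp only [aOuter]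
    rw [seg_nil speed n i (by omega), runB_nil]; ring
  | succ fuel ih =>
    intro i count h0 h1 hf
    simp only [aOuter]
    by_cases hc : i < n
    · rw [if_pos hc]
      rcases h1eq : aLoop1 speed n mC n.toNat i 0 0 with ⟨i1, t1, m1⟩
      rcases h2eq : aLoop2 speed n thr n.toNat i1 t1 m1 with ⟨i2, t2, m2⟩
      obtain ⟨g1, g2, g3⟩ :=
        group speed n mC thr i hlen h0 hc hpre i1 t1 m1 i2 t2 m2 h1eq h2eq
      rw [ih i2 _ (by omega) g2 (by omega), g3]
      split_ifs <;> ring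
    · rw [if_neg hc, seg_nil speed n i (by omega), runB_nil]
      ring

-- ===== B-side lemmas: the prefix-sum pass and the cut-point scan =====

-- the sum of speed[k] onto the sum of the first k speeds
lemma take_sum_succ (speed : List Int) (k : Nat) (h : k < speed.length) :
    (speed.take (k+1)).sum = (speed.take k).sum + speed[k] := by
  rw [List.take_succ, List.sum_append, List.getElem?_eq_getElem h]
  simp

-- pass 1 builds exactly the table of prefix sums
lemma bPrefix_eq (speed : List Int) (m : Nat) (hlen : m ≤ speed.length) :
    bPrefix speed m = (List.range (m+1)).map (fun k => (speed.take k).sum) := by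
  induction m with
  | zero => simp [bPrefix]
  | succ m ih =>
    have hlen' : m ≤ speed.length := by omega
    have hm : m < speed.length := by omega
    have hstep : bPrefix speed (m+1)
        = bPrefix speed m
          ++ [(bPrefix speed m).getD m 0 + (PySem.List.pyGet? speed (m : Int)).getD 0] := by
      simp [bPrefix, List.range_succ]
    rw [hstep, ih hlen']
    have hgetD : ((List.range (m+1)).map (fun k => (speed.take k).sum)).getD m 0
        = (speed.take m).sum := by
      rw [List.getD, List.getElem?_map, List.getElem?_range (by omega)]
      rfl
    have hget : (PySem.List.pyGet? speed (m : Int)).getD 0 = speed[m] := by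
      rw [PySem.List.pyGet?_of_nonneg speed (by omega)]
      simp only [Int.toNat_natCast]
      rw [List.getElem?_eq_getElem hm]
      rfl
    rw [hgetD, hget]
    conv_rhs => rw [show (m+1+1) = (m+1)+1 from rfl, List.range_succ, List.map_append]
    simp [take_sum_succ speed m hm]

lemma bPrefix_getD (speed : List Int) (m k : Nat) (hlen : m ≤ speed.length) (hk : k ≤ m) :
    (bPrefix speed m).getD k 0 = (speed.take k).sum := by
  rw [bPrefix_eq speed m hlen, List.getD, List.getElem?_map, List.getElem?_range (by omega)]
  rfl

-- pass 2 (scan over k with last-cut index j) = the reference single pass runB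
lemma L_B (speed : List Int) (mC thr M : Int) (h0M : 0 ≤ M) (hlen : M ≤ (speed.length : Int)) :
    ∀ (fuel : Nat) (i j count : Int), 1 ≤ i → i ≤ M + 1 → 0 ≤ j → j < i →
    (M + 1 - i).toNat = fuel →
    ((PySem.List.pyRange i (M + 1) 1).foldl (bStep (bPrefix speed M.toNat) mC thr) (count, j)).1
      = count + runB mC thr (seg speed M (i-1))
          ((speed.take (i-1).toNat).sum - (speed.take j.toNat).sum) ((i-1) - j) := by
  intro fuel
  induction fuel with
  | zero =>
    intro i j count h1 h2 hj0 hji hf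
    have hi : i = M + 1 := by omega
    rw [PySem.List.pyRange_one_eq_nil (by omega), seg_nil speed M (i-1) (by omega), runB_nil]
    simp
  | succ fuel ih =>
    intro i j count h1 h2 hj0 hji hf
    have hiM : i < M + 1 := by omega
    rw [PySem.List.pyRange_one_cons hiM, List.foldl_cons]
    have hlenN : M.toNat ≤ speed.length := by omega
    have hPi : (bPrefix speed M.toNat).getD i.toNat 0 = (speed.take i.toNat).sum :=
      bPrefix_getD speed M.toNat i.toNat hlenN (by omega)
    have hPj : (bPrefix speed M.toNat).getD j.toNat 0 = (speed.take j.toNat).sum :=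
      bPrefix_getD speed M.toNat j.toNat hlenN (by omega)
    have hidx : (i-1).toNat < speed.length := by omega
    have hsucc : i.toNat = (i-1).toNat + 1 := by omega
    have hhead : (PySem.List.pyGet? speed (i-1)).getD 0 = speed[(i-1).toNat] := by
      rw [PySem.List.pyGet?_of_nonneg speed (by omega), List.getElem?_eq_getElem hidx]
      rfl
    have hsum : (speed.take i.toNat).sum
        = (speed.take (i-1).toNat).sum + (PySem.List.pyGet? speed (i-1)).getD 0 := by
      rw [hhead, hsucc, take_sum_succ speed (i-1).toNat hidx]
    rw [seg_cons speed M (i-1) (by omega) (by omega) hlen]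
    simp only [runB]
    rw [show (i-1) + 1 = i from by ring]
    have hcond : (mC ≤ i - j ∧
        thr ≤ (bPrefix speed M.toNat).getD i.toNat 0 - (bPrefix speed M.toNat).getD j.toNat 0)
        ↔ (mC ≤ (i-1) - j + 1 ∧ thr ≤ (speed.take (i-1).toNat).sum - (speed.take j.toNat).sum
            + (PySem.List.pyGet? speed (i-1)).getD 0) := by
      rw [hPi, hPj, hsum]
      constructor <;> intro ⟨a, b⟩ <;> exact ⟨by omega, by omega⟩
    rw [bStep]
    split_ifs with hc hr hr
    · -- cut taken
      rw [ih (i+1) i (count+1) (by omega) (by omega) (by omega) (by omega) (by omega)]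
      rw [show i + 1 - 1 = i from by ring]
      simp only [sub_self]
      ring
    · exact absurd (hcond.mp hc) hr
    · exact absurd (hcond.mpr hr) hc
    · -- no cut
      rw [ih (i+1) j count (by omega) (by omega) (by omega) (by omega) (by omega)]
      rw [show i + 1 - 1 = i from by ring, hsum,
        show i - 1 - j + 1 = i - j from by ring,
        show (speed.take (i-1).toNat).sum - (speed.take j.toNat).sum
            + (PySem.List.pyGet? speed (i-1)).getD 0
          = (speed.take (i-1).toNat).sum + (PySem.List.pyGet? speed (i-1)).getD 0
            - (speed.take j.toNat).sum from by ring]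

-- ===== VERDICT (by name: the statement is the Claim_ definition above) =====
theorem max_networks_spec : Claim_equal_max_networks := by
  intro n speed mC thr _ hpre
  obtain ⟨hlen, hterm⟩ := hpre
  show max_networks n speed mC thr = max_networks_alt n speed mC thr
  rw [max_networks, max_networks_alt]
  by_cases hn : n ≤ 0
  · have h1 : n.toNat = 0 := by omega
    have hmax : max n 0 = 0 := by omega
    rw [h1, hmax]
    rw [PySem.List.pyRange_one_eq_nil (by omega)]
    simp [aOuter]
  · push_neg at hn
    have hpre' : ¬ (mC ≤ 0 ∧ thr ≤ 0) := by
      rcases hterm with h | h | h <;> omega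
    have hmax : max n 0 = n := by omega
    rw [hmax]
    rw [L_out speed n mC thr hlen hpre' n.toNat 0 0 (le_refl _) (by omega) (by omega)]
    rw [L_B speed mC thr n (by omega) hlen (n + 1 - 1).toNat 1 0 0 (le_refl _) (by omega)
      (le_refl _) (by omega) rfl]
    simp
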